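-- pv_equiv track=rewrite | github.com/MRJR0101/unified_url_toolkit | specialized/security_analyzer.py | parse_robots_meta_tag
-- ===== SOURCE A (Python) =====
-- from typing import TYPE_CHECKING, Dict, List, Optional
--
-- def parse_robots_meta_tag(meta_content: str) -> Dict[str, bool]:
--     """
--     Parse robots meta tag content.
--
--     Args:
--         meta_content: Content of meta robots tag
--
--     Returns:
--         Dictionary of directives
--
--     Example:
--         >>> parse_robots_meta_tag("noindex, nofollow")
--         {'noindex': True, 'nofollow': True}
--     """
--     directives = {}
--
--     for directive in meta_content.lower().split(","):
--         directive = directive.strip()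
--
--         if directive in (
--             "index",
--             "noindex",
--             "follow",
--             "nofollow",
--             "noarchive",
--             "nosnippet",
--             "noimageindex",
--             "none",
--             "all",
--         ):
--             directives[directive] = True
--
--     return directives
-- ===== SOURCE B (Python) =====
-- VALID_DIRECTIVES = {
--     "index", "noindex", "follow", "nofollow", "noarchive",
--     "nosnippet", "noimageindex", "none", "all",
-- }
--
--
-- def parse_robots_meta_tag(meta_content: str):
--     tokens = [t.strip() for t in meta_content.lower().split(",")]
--     hits = set(tokens) & VALID_DIRECTIVES
--     return dict.fromkeys(sorted(hits, key=tokens.index), True)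
-- ===== Notes on version B (the rewrite author's own statement) =====
-- stated objective: idiomatic
-- what changed: Replaces the per-token loop-with-branch and dict mutation by building the token list once, intersecting set(tokens) with a module-level constant set of valid directives, and constructing the result with dict.fromkeys over the intersection ordered by first occurrence.
import Mathlib
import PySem

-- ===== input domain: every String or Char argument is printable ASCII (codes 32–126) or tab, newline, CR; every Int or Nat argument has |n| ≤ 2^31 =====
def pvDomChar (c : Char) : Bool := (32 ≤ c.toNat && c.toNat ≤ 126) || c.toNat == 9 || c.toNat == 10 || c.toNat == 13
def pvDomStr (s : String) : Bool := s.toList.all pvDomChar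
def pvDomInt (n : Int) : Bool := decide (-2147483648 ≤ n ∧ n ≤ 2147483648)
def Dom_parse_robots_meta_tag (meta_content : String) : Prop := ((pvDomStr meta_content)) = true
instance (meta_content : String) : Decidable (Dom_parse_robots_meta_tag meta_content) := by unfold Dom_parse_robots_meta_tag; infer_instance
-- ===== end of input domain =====

-- B replaces A's per-token loop-and-branch dict mutation by one set intersection
-- (set(tokens) & VALID_DIRECTIVES) ordered by first occurrence — idiomatic, same cost.


-- ===== PORT A =====
-- the literal tuple of valid directives A tests membership in
def pvValid : List String :=
  ["index", "noindex", "follow", "nofollow", "noarchive",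
   "nosnippet", "noimageindex", "none", "all"]

-- literal transliteration of A: loop over meta_content.lower().split(","), strip,
-- test membership, directives[directive] = True; return the dict (as its items list).
-- split? is exact here: the separator "," is non-empty, so Python's split never raises.
def parse_robots_meta_tag (meta_content : String) : List (String × Bool) :=
  (((PySem.Str.split? (PySem.Str.lower meta_content) ",").getD []).foldl
    (fun d s =>
      let directive := PySem.Str.strip s
      if pvValid.contains directive then PySem.Dict.insert d directive true else d)
    PySem.Dict.empty).items

-- ===== PORT B =====
-- module-level constant set VALID_DIRECTIVES of Source B
def pvValidSet : PySem.Set String :=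
  PySem.Set.ofList
    ["index", "noindex", "follow", "nofollow", "noarchive",
     "nosnippet", "noimageindex", "none", "all"]

-- literal transliteration of B: tokens = [t.strip() for t in meta_content.lower().split(",")];
-- hits = set(tokens) & VALID_DIRECTIVES; dict.fromkeys(sorted(hits, key=tokens.index), True).
-- tokens.index(t) is total on hits (every hit occurs in tokens), ported as index? with getD 0.
def parse_robots_meta_tag_alt (meta_content : String) : List (String × Bool) :=
  let tokens := ((PySem.Str.split? (PySem.Str.lower meta_content) ",").getD []).map PySem.Str.strip
  let hits := PySem.Set.inter (PySem.Set.ofList tokens) pvValidSet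
  (PySem.List.sorted hits (fun t => (PySem.List.index? tokens t).getD 0) false).map
    (fun t => (t, true))

-- ===== PRECONDITION & SPEC =====
def Spec_parse_robots_meta_tag (meta_content : String) (out : List (String × Bool)) : Prop := out = parse_robots_meta_tag_alt meta_content
instance (meta_content : String) (out : List (String × Bool)) : Decidable (Spec_parse_robots_meta_tag meta_content out) := by unfold Spec_parse_robots_meta_tag; infer_instance

-- ===== CLAIM (what is proved, stated in full; the proofs are below) =====
def Claim_equal_parse_robots_meta_tag : Prop := ∀ (meta_content : String), Dom_parse_robots_meta_tag meta_content → Spec_parse_robots_meta_tag meta_content (parse_robots_meta_tag meta_content)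

-- ===== LEMMAS AND PROOFS =====

-- membership test on the dicts A builds: keys are exactly s
theorem pv_contains_mk (s : List String) (t : String) :
    (PySem.Dict.mk (s.map (fun a => (a, true)))).contains t = s.contains t := by
  simp [PySem.Dict.contains_eq_decide_mem_keys, PySem.Dict.keys_mk]

-- inserting True at key t into such a dict is Set.add on the key list
theorem pv_insert_mk (s : List String) (t : String) :
    PySem.Dict.insert (PySem.Dict.mk (s.map (fun a => (a, true)))) t true
      = PySem.Dict.mk ((PySem.Set.add s t).map (fun a => (a, true))) := by
  apply PySem.Dict.ext
  rw [PySem.Dict.items_insert]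
  by_cases hm : t ∈ s
  · rw [pv_contains_mk]
    simp only [List.contains_eq_mem, hm, decide_true, if_true, PySem.Set.add_of_mem hm]
    simp only [List.map_map]
    apply List.map_congr_left
    intro a _
    by_cases h : a = t <;> simp [h]
  · rw [pv_contains_mk]
    simp [List.contains_eq_mem, hm]

-- A's whole loop: strip, test membership, insert True — items are Set.update of the keys
theorem pv_foldA (raws : List String) : ∀ s : List String,
    ((raws.foldl
      (fun d t =>
        let directive := PySem.Str.strip t
        if pvValid.contains directive then PySem.Dict.insert d directive true else d)
      (PySem.Dict.mk (s.map (fun a => (a, true))))).items)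
    = (PySem.Set.update s ((raws.map PySem.Str.strip).filter
        (fun t => pvValid.contains t))).map (fun a => (a, true)) := by
  induction raws with
  | nil => intro s; simp [PySem.Set.update_nil]
  | cons r rs ih =>
    intro s
    simp only [List.foldl_cons, List.map_cons, List.filter_cons]
    by_cases hc : pvValid.contains (PySem.Str.strip r)
    · simp only [hc, if_true, pv_insert_mk, ih, PySem.Set.update_cons]
    · simp only [hc, Bool.false_eq_true, if_false, ih]

-- set(...) commutes with filtering
theorem pv_ofList_filter (p : String → Bool) (xs : List String) :
    PySem.Set.ofList (xs.filter p) = (PySem.Set.ofList xs).filter p := by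
  induction xs using List.reverseRecOn with
  | nil => rfl
  | append_singleton xs x ih =>
    rw [List.filter_append, PySem.Set.ofList_append_singleton]
    by_cases hp : p x
    · simp only [List.filter_cons, hp, if_true, List.filter_nil,
        PySem.Set.ofList_append_singleton, ih]
      by_cases hm : x ∈ xs
      · rw [PySem.Set.add_of_mem ((PySem.Set.mem_ofList _ _).2 hm), PySem.Set.add_of_mem]
        simp [List.mem_filter, PySem.Set.mem_ofList, hm, hp]
      · rw [PySem.Set.add_of_not_mem (fun h => hm ((PySem.Set.mem_ofList _ _).1 h)),
          PySem.Set.add_of_not_mem, List.filter_append]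
        · simp [hp]
        · simp [List.mem_filter, PySem.Set.mem_ofList, hm]
    · simp only [List.filter_cons, hp, Bool.false_eq_true, if_false, List.filter_nil,
        List.append_nil, ih]
      by_cases hm : x ∈ xs
      · rw [PySem.Set.add_of_mem ((PySem.Set.mem_ofList _ _).2 hm)]
      · rw [PySem.Set.add_of_not_mem (fun h => hm ((PySem.Set.mem_ofList _ _).1 h)),
          List.filter_append]
        simp [hp]

-- the elements of set(xs) are in strictly increasing order of first occurrence in xs
theorem pv_pairwise_idx (xs : List String) :
    (PySem.Set.ofList xs).Pairwise
      (fun a b => ((PySem.List.index? xs a).getD 0) < ((PySem.List.index? xs b).getD 0)) := by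
  induction xs using List.reverseRecOn with
  | nil => simp [PySem.Set.ofList_nil]
  | append_singleton xs x ih =>
    rw [PySem.Set.ofList_append_singleton]
    have transport : ∀ a, a ∈ PySem.Set.ofList xs →
        PySem.List.index? (xs ++ [x]) a = PySem.List.index? xs a := by
      intro a ha
      exact PySem.List.index?_append_of_mem _ ((PySem.Set.mem_ofList _ _).1 ha)
    by_cases hm : x ∈ xs
    · rw [PySem.Set.add_of_mem ((PySem.Set.mem_ofList _ _).2 hm)]
      refine ih.imp_of_mem ?_
      intro a b ha hb h
      rw [transport a ha, transport b hb]
      exact h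
    · rw [PySem.Set.add_of_not_mem (fun h => hm ((PySem.Set.mem_ofList _ _).1 h))]
      rw [List.pairwise_append]
      refine ⟨ih.imp_of_mem ?_, List.pairwise_singleton _ _, ?_⟩
      · intro a b ha hb h
        rw [transport a ha, transport b hb]; exact h
      · intro a ha b hb
        rw [List.mem_singleton] at hb; subst hb
        rw [transport a ha, PySem.List.index?_append_singleton_self _ _ hm]
        have haxs : a ∈ xs := (PySem.Set.mem_ofList _ _).1 ha
        obtain ⟨k, hk⟩ := Option.isSome_iff_exists.1
          ((PySem.List.index?_isSome_iff _ _).2 haxs)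
        obtain ⟨hlt, -, -⟩ := PySem.List.getElem_of_index?_eq_some hk
        rw [hk]
        simpa using hlt

-- ===== VERDICT (by name: the statement is the Claim_ definition above) =====
theorem parse_robots_meta_tag_spec : Claim_equal_parse_robots_meta_tag := by
  intro mc _
  unfold Spec_parse_robots_meta_tag parse_robots_meta_tag parse_robots_meta_tag_alt
  have hvalid : pvValidSet = pvValid := by decide
  generalize (PySem.Str.split? (PySem.Str.lower mc) ",").getD [] = raws
  have hinter : PySem.Set.inter (PySem.Set.ofList (raws.map PySem.Str.strip)) pvValidSet
      = (PySem.Set.ofList (raws.map PySem.Str.strip)).filter (fun t => pvValid.contains t) := by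
    show (PySem.Set.ofList (raws.map PySem.Str.strip)).filter
        (fun x => PySem.Set.contains pvValidSet x) = _
    apply List.filter_congr
    intro x _
    rw [PySem.Set.contains_eq_listContains, hvalid]
  have hsorted : PySem.List.sorted
      ((PySem.Set.ofList (raws.map PySem.Str.strip)).filter (fun t => pvValid.contains t))
      (fun t => (PySem.List.index? (raws.map PySem.Str.strip) t).getD 0) false
      = (PySem.Set.ofList (raws.map PySem.Str.strip)).filter (fun t => pvValid.contains t) := by
    apply PySem.List.sorted_eq_self_of_pairwise
    exact ((pv_pairwise_idx _).filter _).imp (fun h => le_of_lt h)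
  show _ = (PySem.List.sorted
      (PySem.Set.inter (PySem.Set.ofList (raws.map PySem.Str.strip)) pvValidSet)
      (fun t => (PySem.List.index? (raws.map PySem.Str.strip) t).getD 0) false).map
      (fun t => (t, true))
  rw [show (PySem.Dict.empty : PySem.Dict String Bool)
        = PySem.Dict.mk (([] : List String).map (fun a => (a, true))) from rfl,
    pv_foldA, PySem.Set.update_nil_left, pv_ofList_filter, hinter, hsorted]
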